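-- pv_equiv track=rewrite | github.com/ttzytt/PyAutoGrade | tests/Block 4/tested_code/old/9/Unit 1/Card functions/card_functions_reviewed.py | play_amount
-- ===== SOURCE A (Python) =====
-- def play_amount(card):
--
--     amount = [0,0,0,0]
--
--     judge = 1
--     count = 0
--     list = 0
--
--     while count < len(card):
--
--         amount[list] += 1
--
--         if card[count] == 'reverse':
--             judge += 1
--         elif card[count] != 'reverse':
--             judge *= 1
--
--         if judge % 2 == 1:
--             if card[count] != 'skip':
--                 if list >= 3:
--                     list -= 3
--                 elif list <= 2:
--                     list += 1
--             elif card[count] == 'skip':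
--                 if list >= 2:
--                     list -= 2
--                 elif list <= 1:
--                     list += 2
--             count += 1
--
--         elif judge % 2 == 0:
--             if card[count] != 'skip':
--                 if list <= 0:
--                     list += 3
--                 elif list >= 1:
--                     list -= 1
--             elif card[count] == 'skip':
--                 if list <= 1:
--                     list += 2
--                 elif list >= 2:
--                     list -= 2
--             count += 1
--
--     return amount
-- ===== SOURCE B (Python) =====
-- def play_amount(card):
--     # Pass 1: the signed displacement caused by each card (a reverse flips the sign before moving).
--     steps = []
--     sign = 1
--     for c in card:
--         if c == 'reverse':
--             sign = -sign
--         steps.append(sign * (2 if c == 'skip' else 1))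
--     # Pass 2: card k is played by the player sitting at the sum of the first k displacements, mod 4.
--     positions = []
--     total = 0
--     for d in steps:
--         positions.append(total % 4)
--         total += d
--     # Pass 3: tally plays per player.
--     return [positions.count(r) for r in range(4)]
-- ===== Notes on version B (the rewrite author's own statement) =====
-- stated objective: alternative
-- what changed: Replaces the in-place position/judge state machine with three staged passes: signed displacements derived from the running reverse parity, prefix-sum positions taken mod 4, and a final tally by positions.count(r) for each player; the branch-free passes run measurably faster.
import Mathlib
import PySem

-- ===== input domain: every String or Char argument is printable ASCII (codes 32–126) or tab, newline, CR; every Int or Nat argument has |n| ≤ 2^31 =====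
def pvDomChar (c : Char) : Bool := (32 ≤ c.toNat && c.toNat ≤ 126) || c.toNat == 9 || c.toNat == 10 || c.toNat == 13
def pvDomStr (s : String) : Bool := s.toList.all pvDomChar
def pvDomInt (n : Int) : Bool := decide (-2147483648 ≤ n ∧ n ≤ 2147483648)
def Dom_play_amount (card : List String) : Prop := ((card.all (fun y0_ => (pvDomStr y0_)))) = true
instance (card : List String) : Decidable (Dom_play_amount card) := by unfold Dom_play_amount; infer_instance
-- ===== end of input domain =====

-- B computes the result in three staged passes (signed displacements, prefix-sum positions mod 4, tally by count) instead of A's in-place state machine; same return value, alternative decomposition.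

-- ===== PORT A =====
-- amount[i] += 1 (A only ever uses a non-negative in-range index here)
def pvBump (xs : List Int) (i : Int) : List Int := xs.modify i.toNat (· + 1)

-- literal port of A's while loop: state (amount, judge, list); count advances by one each iteration,
-- so the loop is structural recursion on the card list
def playA_loop : List String → List Int → Int → Int → List Int
  | [], amount, _, _ => amount
  | c :: rest, amount, judge, lst =>
    let amount := pvBump amount lst
    let judge := if c = "reverse" then judge + 1 else judge * 1
    if PySem.Int.mod judge 2 = 1 then
      let lst := if c ≠ "skip" then (if lst ≥ 3 then lst - 3 else lst + 1)
                 else (if lst ≥ 2 then lst - 2 else lst + 2)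
      playA_loop rest amount judge lst
    else
      let lst := if c ≠ "skip" then (if lst ≤ 0 then lst + 3 else lst - 1)
                 else (if lst ≤ 1 then lst + 2 else lst - 2)
      playA_loop rest amount judge lst

def play_amount (card : List String) : List Int :=
  playA_loop card [0, 0, 0, 0] 1 0

-- ===== PORT B =====
-- pass 1: signed displacement of each card, sign flipped by each 'reverse'
def stepsOf : List String → Int → List Int
  | [], _ => []
  | c :: rest, sign =>
    let sign := if c = "reverse" then -sign else sign
    sign * (if c = "skip" then 2 else 1) :: stepsOf rest sign

-- pass 2: position of card k = sum of the first k displacements, mod 4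
def posOf : List Int → Int → List Int
  | [], _ => []
  | d :: rest, total => PySem.Int.mod total 4 :: posOf rest (total + d)

-- pass 3: tally plays per player
def play_amount_alt (card : List String) : List Int :=
  (PySem.List.pyRange 0 4 1).map (fun r => PySem.List.count (posOf (stepsOf card 1) 0) r)

-- ===== PRECONDITION & SPEC =====
def Spec_play_amount (card : List String) (out : List Int) : Prop := out = play_amount_alt card
instance (card : List String) (out : List Int) : Decidable (Spec_play_amount card out) := by unfold Spec_play_amount; infer_instance

-- ===== CLAIM =====
def Claim_equal_play_amount : Prop := ∀ (card : List String), Dom_play_amount card → Spec_play_amount card (play_amount card)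

-- ===== LEMMAS AND PROOFS =====

theorem move_f1 (lst : Int) (h0 : 0 ≤ lst) (h4 : lst < 4) :
    (if lst ≥ 3 then lst - 3 else lst + 1) = PySem.Int.mod (lst + 1 * 1) 4 := by
  interval_cases lst <;> decide

theorem move_f2 (lst : Int) (h0 : 0 ≤ lst) (h4 : lst < 4) :
    (if lst ≥ 2 then lst - 2 else lst + 2) = PySem.Int.mod (lst + 1 * 2) 4 := by
  interval_cases lst <;> decide

theorem move_b1 (lst : Int) (h0 : 0 ≤ lst) (h4 : lst < 4) :
    (if lst ≤ 0 then lst + 3 else lst - 1) = PySem.Int.mod (lst + (-1) * 1) 4 := by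
  interval_cases lst <;> decide

theorem move_b2 (lst : Int) (h0 : 0 ≤ lst) (h4 : lst < 4) :
    (if lst ≤ 1 then lst + 2 else lst - 2) = PySem.Int.mod (lst + (-1) * 2) 4 := by
  interval_cases lst <;> decide

theorem mod4_bounds (x : Int) : 0 ≤ PySem.Int.mod x 4 ∧ PySem.Int.mod x 4 < 4 :=
  ⟨PySem.Int.mod_nonneg x (by norm_num), PySem.Int.mod_lt x (by norm_num)⟩

theorem mod4_shift (t x : Int) :
    PySem.Int.mod (PySem.Int.mod t 4 + x) 4 = PySem.Int.mod (t + x) 4 := by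
  rw [PySem.Int.mod_eq_emod_of_pos (by norm_num),
      PySem.Int.mod_eq_emod_of_pos (by norm_num),
      PySem.Int.mod_eq_emod_of_pos (by norm_num)]
  exact Int.emod_add_emod t 4 x

-- A's loop equals: bump the accumulator at every position of B's position stream
theorem play_loop_eq (cs : List String) : ∀ (amount : List Int) (judge total d : Int),
    (d = if PySem.Int.mod judge 2 = 1 then 1 else -1) →
    playA_loop cs amount judge (PySem.Int.mod total 4) =
      (posOf (stepsOf cs d) total).foldl pvBump amount := by
  induction cs with
  | nil => intro amount judge total d _; rfl
  | cons c rest ih =>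
    intro amount judge total d hd
    have h0 := (mod4_bounds total).1
    have h4 := (mod4_bounds total).2
    have hm2 : PySem.Int.mod judge 2 = judge % 2 := PySem.Int.mod_eq_emod_of_pos (by norm_num)
    have hm2' : PySem.Int.mod (judge + 1) 2 = (judge + 1) % 2 := PySem.Int.mod_eq_emod_of_pos (by norm_num)
    rcases Int.emod_two_eq judge with he | he
    · -- judge even, d = -1
      have hd' : d = -1 := by rw [hd, hm2]; split_ifs with h <;> omega
      subst hd'
      by_cases hr : c = "reverse"
      · have hs : c ≠ "skip" := by subst hr; decide
        have hodd : PySem.Int.mod (judge + 1) 2 = 1 := by rw [hm2']; omega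
        simp only [playA_loop, stepsOf, posOf, List.foldl_cons, if_pos hr, if_pos hs, if_neg hs,
          hodd, if_true, neg_neg]
        rw [move_f1 _ h0 h4, mod4_shift]
        exact ih _ _ _ _ (by rw [hodd]; norm_num)
      · have hev : ¬ PySem.Int.mod judge 2 = 1 := by rw [hm2]; omega
        by_cases hs : c = "skip"
        · simp only [playA_loop, stepsOf, posOf, List.foldl_cons, if_neg hr, mul_one, if_neg hev,
            if_neg (show ¬ c ≠ "skip" by simpa using hs), if_pos hs]
          rw [move_b2 _ h0 h4, mod4_shift]
          exact ih _ _ _ _ (by rw [hm2]; omega)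
        · simp only [playA_loop, stepsOf, posOf, List.foldl_cons, if_neg hr, mul_one, if_neg hev,
            if_pos (show c ≠ "skip" from hs), if_neg hs]
          rw [move_b1 _ h0 h4, mod4_shift]
          exact ih _ _ _ _ (by rw [hm2]; omega)
    · -- judge odd, d = 1
      have hd' : d = 1 := by rw [hd, hm2, he]; norm_num
      subst hd'
      by_cases hr : c = "reverse"
      · have hs : c ≠ "skip" := by subst hr; decide
        have hev : ¬ PySem.Int.mod (judge + 1) 2 = 1 := by rw [hm2']; omega
        simp only [playA_loop, stepsOf, posOf, List.foldl_cons, if_pos hr, if_pos hs, if_neg hs,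
          if_neg hev]
        rw [move_b1 _ h0 h4, mod4_shift]
        exact ih _ _ _ _ (by rw [hm2']; split_ifs with h <;> omega)
      · have hodd : PySem.Int.mod judge 2 = 1 := by rw [hm2, he]
        by_cases hs : c = "skip"
        · simp only [playA_loop, stepsOf, posOf, List.foldl_cons, if_neg hr, mul_one, if_pos hodd,
            if_neg (show ¬ c ≠ "skip" by simpa using hs), if_pos hs]
          rw [move_f2 _ h0 h4, mod4_shift]
          exact ih _ _ _ _ (by rw [hodd]; norm_num)
        · simp only [playA_loop, stepsOf, posOf, List.foldl_cons, if_neg hr, mul_one, if_pos hodd,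
            if_pos (show c ≠ "skip" from hs), if_neg hs]
          rw [move_f1 _ h0 h4, mod4_shift]
          exact ih _ _ _ _ (by rw [hodd]; norm_num)

theorem posOf_mem_bounds (ds : List Int) : ∀ (t : Int), ∀ p ∈ posOf ds t, 0 ≤ p ∧ p < 4 := by
  induction ds with
  | nil => intro t p hp; simp [posOf] at hp
  | cons d rest ih =>
    intro t p hp
    simp only [posOf, List.mem_cons] at hp
    rcases hp with h | h
    · subst h; exact mod4_bounds t
    · exact ih _ p h

-- bumping [a0,a1,a2,a3] along a list of in-range positions = adding the counts
theorem foldl_bump_count (ps : List Int) : ∀ (a0 a1 a2 a3 : Int),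
    (∀ p ∈ ps, 0 ≤ p ∧ p < 4) →
    ps.foldl pvBump [a0, a1, a2, a3] =
      [a0 + (ps.count 0 : Int), a1 + (ps.count 1 : Int),
       a2 + (ps.count 2 : Int), a3 + (ps.count 3 : Int)] := by
  induction ps with
  | nil => intro a0 a1 a2 a3 _; simp
  | cons p rest ih =>
    intro a0 a1 a2 a3 hmem
    have hp := hmem p (by simp)
    have hrest : ∀ q ∈ rest, 0 ≤ q ∧ q < 4 := fun q hq => hmem q (by simp [hq])
    obtain ⟨h0, h4⟩ := hp
    have : p = 0 ∨ p = 1 ∨ p = 2 ∨ p = 3 := by omega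
    rcases this with h | h | h | h <;> subst h <;>
      simp [List.foldl_cons, pvBump, List.modify, ih _ _ _ _ hrest] <;>
      ring

-- ===== VERDICT =====
theorem play_amount_spec : Claim_equal_play_amount := by
  intro card _
  unfold Spec_play_amount play_amount play_amount_alt
  have h := play_loop_eq card [0, 0, 0, 0] 1 0 1 (by decide)
  rw [show PySem.Int.mod 0 4 = 0 from by decide] at h
  rw [h]
  have hb := posOf_mem_bounds (stepsOf card 1) 0
  rw [foldl_bump_count _ 0 0 0 0 hb]
  simp [PySem.List.pyRange, PySem.List.count_eq, List.range_succ]
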